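-- pv_equiv track=rewrite | github.com/Rudrarj-Mali/AIpuzzle | backend/main.py | dfs
-- ===== SOURCE A (Python) =====
-- def dfs(maze, start, end, visited=None, path=None):
--     if visited is None: visited = set()
--     if path is None: path = []
--
--     start_tuple = tuple(start)
--     end_tuple = tuple(end)
--
--     x, y = start_tuple
--     if start_tuple == end_tuple:
--         return path + [start]
--
--     visited.add(start_tuple)
--
--     for dx, dy in [(0,1), (1,0), (0,-1), (-1,0)]:
--         nx, ny = x + dx, y + dy
--         if 0 <= nx < len(maze) and 0 <= ny < len(maze[0]) and maze[nx][ny] == 0 and (nx, ny) not in visited: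
--             res = dfs(maze, [nx, ny], end, visited, path + [start]) # Return list
--             if res:
--                 return res
--     return None
-- ===== SOURCE B (Python) =====
-- def dfs(maze, start, end, visited=None, path=None):
--     if visited is None:
--         visited = set()
--     if path is None:
--         path = []
--     rows = len(maze)
--     cols = len(maze[0]) if maze else 0
--     end_tuple = tuple(end)
--     if tuple(start) == end_tuple:
--         return path + [start]
--     x, y = start
--     visited.add((x, y))
--     base = path + [start]
--     stack = []
--     for dx, dy in ((-1, 0), (0, -1), (1, 0), (0, 1)):
--         stack.append(([x + dx, y + dy], base))
--     while stack:
--         node, p = stack.pop()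
--         nx, ny = node
--         if not (0 <= nx < rows and 0 <= ny < cols):
--             continue
--         if maze[nx][ny] != 0 or (nx, ny) in visited:
--             continue
--         if (nx, ny) == end_tuple:
--             return p + [node]
--         visited.add((nx, ny))
--         np = p + [node]
--         for dx, dy in ((-1, 0), (0, -1), (1, 0), (0, 1)):
--             stack.append(([nx + dx, ny + dy], np))
--     return None
-- ===== Notes on version B (the rewrite author's own statement) =====
-- stated objective: alternative
-- what changed: A's recursive backtracking DFS is replaced by an iterative while-loop over an explicit stack of (node, path) pairs that pushes raw neighbour candidates and validates them (bounds, wall, visited) on pop, so pop-time validation reproduces the recursion's call-time visited checks exactly.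
-- outside the precondition, e.g. on dfs([[1, 1], [0]], [0, 0], [0, 0], None, None): A returns [[0, 0]], B returns [[0, 0]]
import Mathlib
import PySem

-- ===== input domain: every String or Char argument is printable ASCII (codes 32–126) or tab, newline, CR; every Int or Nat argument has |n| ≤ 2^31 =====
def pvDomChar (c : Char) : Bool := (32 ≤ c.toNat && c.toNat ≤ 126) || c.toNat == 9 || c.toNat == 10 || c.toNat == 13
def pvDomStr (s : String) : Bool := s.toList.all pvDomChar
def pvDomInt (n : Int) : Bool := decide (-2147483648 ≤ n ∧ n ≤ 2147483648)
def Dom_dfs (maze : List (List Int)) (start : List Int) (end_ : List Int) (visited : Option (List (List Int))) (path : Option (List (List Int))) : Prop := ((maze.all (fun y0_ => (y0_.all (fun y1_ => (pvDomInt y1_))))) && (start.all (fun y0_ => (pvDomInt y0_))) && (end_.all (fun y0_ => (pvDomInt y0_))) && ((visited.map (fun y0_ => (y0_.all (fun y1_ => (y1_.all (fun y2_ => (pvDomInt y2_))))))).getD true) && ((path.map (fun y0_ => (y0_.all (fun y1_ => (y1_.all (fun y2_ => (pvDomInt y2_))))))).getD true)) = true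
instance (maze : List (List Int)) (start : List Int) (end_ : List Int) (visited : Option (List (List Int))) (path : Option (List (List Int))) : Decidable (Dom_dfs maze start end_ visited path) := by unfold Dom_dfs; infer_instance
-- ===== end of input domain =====

-- B replaces A's recursive DFS by an iterative explicit-stack loop that validates nodes on pop
-- (alternative decomposition, same asymptotic cost); equivalence is about the RETURN value
-- (both Pythons mutate the shared `visited` set with the same insertions).

-- ===== PORT A =====

-- grid cells, used only by the termination measures of both ports
def pvCellsI (rows cols : Int) : List (List Int) :=
  (List.range rows.toNat).flatMap (fun i => (List.range cols.toNat).map (fun j => [(i : Int), (j : Int)]))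

def pvFreeI (rows cols : Int) (v : List (List Int)) : Nat :=
  (pvCellsI rows cols).countP (fun c => decide (c ∉ v))

theorem pvMem_cellsI {rows cols nx ny : Int} (h1 : 0 ≤ nx) (h2 : nx < rows)
    (h3 : 0 ≤ ny) (h4 : ny < cols) : [nx, ny] ∈ pvCellsI rows cols := by
  unfold pvCellsI
  simp only [List.mem_flatMap, List.mem_map]
  refine ⟨nx, ?_, ny, ?_, rfl⟩
  · exact List.mem_flatMap.2 ⟨nx.toNat, List.mem_range.2 (by omega), by simp [Int.toNat_of_nonneg h1]⟩
  · exact List.mem_flatMap.2 ⟨ny.toNat, List.mem_range.2 (by omega), by simp [Int.toNat_of_nonneg h3]⟩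

theorem pvFreeI_add_lt {rows cols : Int} {v : List (List Int)} {c : List Int}
    (hc : c ∈ pvCellsI rows cols) (hv : c ∉ v) :
    pvFreeI rows cols (PySem.Set.add v c) < pvFreeI rows cols v := by
  unfold pvFreeI
  obtain ⟨s, t, hst⟩ := List.append_of_mem hc
  rw [hst, List.countP_append, List.countP_append, List.countP_cons, List.countP_cons]
  have hmem : c ∈ PySem.Set.add v c := (PySem.Set.mem_add _ _ _).2 (Or.inr rfl)
  have h1 : (decide (c ∉ PySem.Set.add v c)) = false := by simp [hmem]
  have h2 : (decide (c ∉ v)) = true := by simp [hv]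
  have hms : ∀ (l : List (List Int)), l.countP (fun a => decide (a ∉ PySem.Set.add v c)) ≤ l.countP (fun a => decide (a ∉ v)) := by
    intro l
    apply List.countP_mono_left
    intro a _ ha
    simp only [decide_eq_true_eq, PySem.Set.mem_add] at *
    exact fun h => ha (Or.inl h)
  have := hms s
  have := hms t
  rw [h1, h2]
  simp only [if_true, if_false, Bool.false_eq_true]
  omega

def pvDirsA : List (Int × Int) := [(0, 1), (1, 0), (0, -1), (-1, 0)]

-- Port of A's recursion.  `start` is threaded as its two coordinates x, y (Python unpacks
-- `x, y = start_tuple`, exact for length-2 start lists — guaranteed by Pre_dfs); the mutated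
-- `visited` set is threaded explicitly and returned.  `fuel` is a pure totality guard
-- (Python's recursion always terminates because `visited` grows): the 0-branch is never
-- reached when dfs supplies `pvFreeI … + 1`, as the pvGoSim proof below shows.
-- maze[nx][ny] is read via pyGet?; after the bounds checks (and Pre_dfs's row-length
-- condition) the access is exactly Python's.
mutual
def dfsRecF (fuel : Nat) (maze : List (List Int)) (x y : Int) (end_ : List Int)
    (v : List (List Int)) (path : List (List Int)) :
    Option (List (List Int)) × List (List Int) :=
  if ([x, y] : List Int) = end_ then
    (some (path ++ [[x, y]]), v)
  else
    dfsGoF fuel maze x y end_ pvDirsA (PySem.Set.add v [x, y]) path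
  termination_by 5 * fuel + 5
  decreasing_by simp [pvDirsA]

def dfsGoF (fuel : Nat) (maze : List (List Int)) (x y : Int) (end_ : List Int)
    (dirs : List (Int × Int)) (v : List (List Int)) (path : List (List Int)) :
    Option (List (List Int)) × List (List Int) :=
  match dirs with
  | [] => (none, v)
  | (dx, dy) :: rest =>
    let nx := x + dx
    let ny := y + dy
    if _h : 0 ≤ nx ∧ nx < (maze.length : Int) ∧ 0 ≤ ny ∧ ny < ((maze.headD []).length : Int)
        ∧ (PySem.List.pyGet? ((PySem.List.pyGet? maze nx).getD []) ny).getD 1 = 0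
        ∧ [nx, ny] ∉ v then
      if _hf : fuel = 0 then (none, v)   -- fuel guard only, unreachable from dfs
      else
        let r := dfsRecF (fuel - 1) maze nx ny end_ v (path ++ [[x, y]])
        if r.1.isSome then r
        else dfsGoF fuel maze x y end_ rest r.2 path
    else dfsGoF fuel maze x y end_ rest v path
  termination_by 5 * fuel + dirs.length
  decreasing_by
  · simp only [List.length_cons]; omega
  · simp only [List.length_cons]; omega
  · simp only [List.length_cons]; omega
end

-- literal port of A: default-None handling, then the recursion above
def dfs (maze : List (List Int)) (start : List Int) (end_ : List Int)
    (visited : Option (List (List Int))) (path : Option (List (List Int))) :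
    Option (List (List Int)) :=
  let v := visited.getD []          -- if visited is None: visited = set()
  let p := path.getD []             -- if path is None: path = []
  let x := start.headD 0            -- x, y = start_tuple  (exact for length-2 start: Pre_dfs)
  let y := (start.drop 1).headD 0
  (dfsRecF (pvFreeI (maze.length : Int) ((maze.headD []).length : Int) v + 1)
    maze x y end_ v p).1

-- ===== PORT B =====

def pvDirsB : List (Int × Int) := [(-1, 0), (0, -1), (1, 0), (0, 1)]

-- port of B's while-loop: the stack is a list with its head as top; nodes are validated on pop.
-- Stack nodes are always 2-lists [nx, ny] built by the pushes, so `nx, ny = node` is exact.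
def dfsLoop (maze : List (List Int)) (rows cols : Int) (endT : List Int)
    (stack : List (List Int × List (List Int))) (v : List (List Int)) :
    Option (List (List Int)) :=
  match stack with
  | [] => none
  | (node, p) :: rest =>
    let nx := node.headD 0
    let ny := (node.drop 1).headD 0
    if ¬ (0 ≤ nx ∧ nx < rows ∧ 0 ≤ ny ∧ ny < cols) then
      dfsLoop maze rows cols endT rest v
    else if _h2 : (PySem.List.pyGet? ((PySem.List.pyGet? maze nx).getD []) ny).getD 1 ≠ 0 ∨ [nx, ny] ∈ v then
      dfsLoop maze rows cols endT rest v
    else if ([nx, ny] : List Int) = endT then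
      some (p ++ [[nx, ny]])
    else
      dfsLoop maze rows cols endT
        (pvDirsB.foldl (fun st d => ([nx + d.1, ny + d.2], p ++ [[nx, ny]]) :: st) rest)
        (PySem.Set.add v [nx, ny])
termination_by 5 * pvFreeI rows cols v + stack.length
decreasing_by
  · simp only [List.length_cons]; omega
  · simp only [List.length_cons]; omega
  · rename_i hb _
    rw [not_not] at hb
    have hc : ([node.headD 0, (node.drop 1).headD 0] : List Int) ∈ pvCellsI rows cols :=
      pvMem_cellsI hb.1 hb.2.1 hb.2.2.1 hb.2.2.2
    have hnv : ([node.headD 0, (node.drop 1).headD 0] : List Int) ∉ v := fun hm => _h2 (Or.inr hm)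
    have hlt := pvFreeI_add_lt hc hnv
    simp only [pvDirsB, List.foldl, List.length_cons]
    omega

-- literal port of B: default-None handling, precomputed bounds, initial pushes, then the loop
def dfs_alt (maze : List (List Int)) (start : List Int) (end_ : List Int)
    (visited : Option (List (List Int))) (path : Option (List (List Int))) :
    Option (List (List Int)) :=
  let v := visited.getD []
  let p := path.getD []
  let rows := (maze.length : Int)
  let cols := ((maze.headD []).length : Int)   -- len(maze[0]) if maze else 0
  if start = end_ then some (p ++ [start])
  else
    let x := start.headD 0                     -- x, y = start  (exact for length-2 start: Pre_dfs)
    let y := (start.drop 1).headD 0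
    let base := p ++ [start]
    dfsLoop maze rows cols end_
      (pvDirsB.foldl (fun st d => ([x + d.1, y + d.2], base) :: st) []) (PySem.Set.add v [x, y])

-- ===== PRECONDITION & SPEC =====
-- Pre_dfs excludes start lists whose length is not 2 (Python A raises ValueError unpacking
-- `x, y = start_tuple`) and mazes having a row shorter than the first row, on which A raises
-- IndexError as soon as the search probes a missing cell of that row (and returns only when the
-- search happens never to touch it).
def Pre_dfs (maze : List (List Int)) (start : List Int) (end_ : List Int)
    (visited : Option (List (List Int))) (path : Option (List (List Int))) : Prop :=
  start.length = 2 ∧ ∀ row ∈ maze, (maze.headD []).length ≤ row.length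
instance (maze : List (List Int)) (start : List Int) (end_ : List Int) (visited : Option (List (List Int))) (path : Option (List (List Int))) : Decidable (Pre_dfs maze start end_ visited path) := by unfold Pre_dfs; infer_instance

def pvWitness_dfs : List (List Int) × List Int × List Int × Option (List (List Int)) × Option (List (List Int)) :=
  ([[0, 0], [1, 0]], [0, 0], [1, 1], none, none)

def Spec_dfs (maze : List (List Int)) (start : List Int) (end_ : List Int) (visited : Option (List (List Int))) (path : Option (List (List Int))) (out : Option (List (List Int))) : Prop := out = dfs_alt maze start end_ visited path
instance (maze : List (List Int)) (start : List Int) (end_ : List Int) (visited : Option (List (List Int))) (path : Option (List (List Int))) (out : Option (List (List Int))) : Decidable (Spec_dfs maze start end_ visited path out) := by unfold Spec_dfs; infer_instance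

-- ===== CLAIM (what is proved, stated in full; the proofs are below) =====
def Claim_equal_dfs : Prop := ∀ (maze : List (List Int)) (start : List Int) (end_ : List Int) (visited : Option (List (List Int))) (path : Option (List (List Int))), Dom_dfs maze start end_ visited path → Pre_dfs maze start end_ visited path → Spec_dfs maze start end_ visited path (dfs maze start end_ visited path)

-- ===== LEMMAS AND PROOFS =====

theorem pvFreeI_mono {rows cols : Int} {v w : List (List Int)}
    (h : ∀ c, c ∈ v → c ∈ w) : pvFreeI rows cols w ≤ pvFreeI rows cols v := by
  unfold pvFreeI
  apply List.countP_mono_left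
  intro c _ hc
  simp only [decide_eq_true_eq] at *
  exact fun hv => hc (h c hv)

-- the four pushes of B, as an explicit segment in A's direction order
theorem pvStack_eq (nx ny : Int) (p1 : List (List Int)) (st : List (List Int × List (List Int))) :
    pvDirsB.foldl (fun st d => ([nx + d.1, ny + d.2], p1) :: st) st =
      (pvDirsA.map (fun d => ([nx + d.1, ny + d.2], p1))) ++ st := by
  simp [pvDirsA, pvDirsB]

-- A's search only ever adds cells to the visited set
theorem pvSubset (maze : List (List Int)) (end_ : List Int) :
    ∀ (fuel : Nat),
      (∀ (x y : Int) (v path : List (List Int)) (c : List Int),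
        c ∈ v → c ∈ (dfsRecF fuel maze x y end_ v path).2) ∧
      (∀ (dirs : List (Int × Int)) (x y : Int) (v path : List (List Int)) (c : List Int),
        c ∈ v → c ∈ (dfsGoF fuel maze x y end_ dirs v path).2) := by
  intro fuel
  induction fuel with
  | zero =>
    have hgo : ∀ (dirs : List (Int × Int)) (x y : Int) (v path : List (List Int)) (c : List Int),
        c ∈ v → c ∈ (dfsGoF 0 maze x y end_ dirs v path).2 := by
      intro dirs
      induction dirs with
      | nil => intro x y v path c hc; rw [dfsGoF]; exact hc
      | cons d ds ihd =>
        intro x y v path c hc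
        obtain ⟨dx, dy⟩ := d
        rw [dfsGoF]
        by_cases hcnd : 0 ≤ x + dx ∧ x + dx < (maze.length : Int) ∧ 0 ≤ y + dy
            ∧ y + dy < ((maze.headD []).length : Int)
            ∧ (PySem.List.pyGet? ((PySem.List.pyGet? maze (x + dx)).getD []) (y + dy)).getD 1 = 0
            ∧ [x + dx, y + dy] ∉ v
        · rw [dif_pos hcnd, dif_pos rfl]; exact hc
        · rw [dif_neg hcnd]; exact ihd x y v path c hc
    refine ⟨?_, hgo⟩
    intro x y v path c hc
    rw [dfsRecF]
    split
    · exact hc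
    · exact hgo _ _ _ _ _ c ((PySem.Set.mem_add _ _ _).2 (Or.inl hc))
  | succ m ihm =>
    have hgo : ∀ (dirs : List (Int × Int)) (x y : Int) (v path : List (List Int)) (c : List Int),
        c ∈ v → c ∈ (dfsGoF (m + 1) maze x y end_ dirs v path).2 := by
      intro dirs
      induction dirs with
      | nil => intro x y v path c hc; rw [dfsGoF]; exact hc
      | cons d ds ihd =>
        intro x y v path c hc
        obtain ⟨dx, dy⟩ := d
        rw [dfsGoF]
        by_cases hcnd : 0 ≤ x + dx ∧ x + dx < (maze.length : Int) ∧ 0 ≤ y + dy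
            ∧ y + dy < ((maze.headD []).length : Int)
            ∧ (PySem.List.pyGet? ((PySem.List.pyGet? maze (x + dx)).getD []) (y + dy)).getD 1 = 0
            ∧ [x + dx, y + dy] ∉ v
        · rw [dif_pos hcnd, dif_neg (Nat.succ_ne_zero m)]
          simp only [Nat.add_sub_cancel]
          have hc1 : c ∈ (dfsRecF m maze (x + dx) (y + dy) end_ v (path ++ [[x, y]])).2 :=
            ihm.1 _ _ _ _ c hc
          by_cases hs : (dfsRecF m maze (x + dx) (y + dy) end_ v (path ++ [[x, y]])).1.isSome
          · rw [if_pos hs]; exact hc1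
          · rw [if_neg hs]; exact ihd x y _ path c hc1
        · rw [dif_neg hcnd]; exact ihd x y v path c hc
    refine ⟨?_, hgo⟩
    intro x y v path c hc
    rw [dfsRecF]
    split
    · exact hc
    · exact hgo _ _ _ _ _ c ((PySem.Set.mem_add _ _ _).2 (Or.inl hc))

-- SIMULATION: running B's loop on the stack segment that A's direction scan over `dirs`
-- would generate (from node (x,y), path p) equals: run A's scan; if it found a result return
-- it, otherwise continue the loop on `rest` with the visited set the scan produced.
theorem pvGoSim (maze : List (List Int)) (end_ : List Int) :
    ∀ (fuel : Nat) (dirs : List (Int × Int)) (v : List (List Int)) (x y : Int)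
      (p : List (List Int)) (rest : List (List Int × List (List Int))),
      [x, y] ∈ v →
      pvFreeI (maze.length : Int) ((maze.headD []).length : Int) v ≤ fuel →
      dfsLoop maze (maze.length : Int) ((maze.headD []).length : Int) end_
          ((dirs.map (fun d => ([x + d.1, y + d.2], p ++ [[x, y]]))) ++ rest) v =
        (let r := dfsGoF fuel maze x y end_ dirs v p
         if r.1.isSome then r.1
         else dfsLoop maze (maze.length : Int) ((maze.headD []).length : Int) end_ rest r.2) := by
  intro fuel
  induction fuel with
  | zero =>
    intro dirs
    induction dirs with
    | nil =>
      intro v x y p rest hv hb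
      simp [dfsGoF]
    | cons d ds ihd =>
      intro v x y p rest hv hb
      obtain ⟨dx, dy⟩ := d
      simp only [List.map_cons, List.cons_append]
      rw [dfsLoop, dfsGoF]
      simp only [List.headD_cons, List.drop_one, List.tail_cons]
      by_cases hbnd : (0 ≤ x + dx ∧ x + dx < (maze.length : Int) ∧ 0 ≤ y + dy ∧ y + dy < ((maze.headD []).length : Int))
      · by_cases hget : (PySem.List.pyGet? ((PySem.List.pyGet? maze (x + dx)).getD []) (y + dy)).getD 1 = 0
        · by_cases hmem : ([x + dx, y + dy] : List Int) ∈ v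
          · rw [if_neg (not_not_intro hbnd), dif_pos (Or.inr hmem),
              dif_neg (fun hcon => hcon.2.2.2.2.2 hmem)]
            exact ihd v x y p rest hv hb
          · -- impossible at fuel 0: an unvisited in-bounds free cell forces pvFreeI v ≥ 1
            exfalso
            have := pvFreeI_add_lt (pvMem_cellsI hbnd.1 hbnd.2.1 hbnd.2.2.1 hbnd.2.2.2) hmem
            omega
        · rw [if_neg (not_not_intro hbnd), dif_pos (Or.inl hget),
            dif_neg (fun hcon => hget hcon.2.2.2.2.1)]
          exact ihd v x y p rest hv hb
      · rw [if_pos hbnd, dif_neg (fun hcon => hbnd ⟨hcon.1, hcon.2.1, hcon.2.2.1, hcon.2.2.2.1⟩)]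
        exact ihd v x y p rest hv hb
  | succ m ihm =>
    intro dirs
    induction dirs with
    | nil =>
      intro v x y p rest hv hb
      simp [dfsGoF]
    | cons d ds ihd =>
      intro v x y p rest hv hb
      obtain ⟨dx, dy⟩ := d
      simp only [List.map_cons, List.cons_append]
      rw [dfsLoop, dfsGoF]
      simp only [List.headD_cons, List.drop_one, List.tail_cons]
      by_cases hbnd : (0 ≤ x + dx ∧ x + dx < (maze.length : Int) ∧ 0 ≤ y + dy ∧ y + dy < ((maze.headD []).length : Int))
      · by_cases hget : (PySem.List.pyGet? ((PySem.List.pyGet? maze (x + dx)).getD []) (y + dy)).getD 1 = 0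
        · by_cases hmem : ([x + dx, y + dy] : List Int) ∈ v
          · rw [if_neg (not_not_intro hbnd), dif_pos (Or.inr hmem),
              dif_neg (fun hcon => hcon.2.2.2.2.2 hmem)]
            exact ihd v x y p rest hv hb
          · -- the valid unvisited neighbour: the loop pops it exactly when A recurses into it
            rw [if_neg (not_not_intro hbnd),
              dif_neg (fun hcon => hcon.elim (fun hg => hg hget) hmem),
              dif_pos ⟨hbnd.1, hbnd.2.1, hbnd.2.2.1, hbnd.2.2.2, hget, hmem⟩,
              dif_neg (Nat.succ_ne_zero m)]
            simp only [Nat.add_sub_cancel]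
            rw [dfsRecF]
            by_cases hend : ([x + dx, y + dy] : List Int) = end_
            · rw [if_pos hend, if_pos hend]
              simp
            · rw [if_neg hend, if_neg hend, pvStack_eq]
              have hcell := pvMem_cellsI hbnd.1 hbnd.2.1 hbnd.2.2.1 hbnd.2.2.2
              have hlt := pvFreeI_add_lt hcell hmem
              rw [ihm pvDirsA (PySem.Set.add v [x + dx, y + dy]) (x + dx) (y + dy)
                (p ++ [[x, y]]) ((List.map (fun d => ([x + d.1, y + d.2], p ++ [[x, y]])) ds) ++ rest)
                ((PySem.Set.mem_add _ _ _).2 (Or.inr rfl)) (by omega)]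
              have hsub : ∀ c, c ∈ v →
                  c ∈ (dfsGoF m maze (x + dx) (y + dy) end_ pvDirsA
                    (PySem.Set.add v [x + dx, y + dy]) (p ++ [[x, y]])).2 := by
                intro c hc
                exact (pvSubset maze end_ m).2 _ _ _ _ _ c ((PySem.Set.mem_add _ _ _).2 (Or.inl hc))
              cases hS : (dfsGoF m maze (x + dx) (y + dy) end_ pvDirsA
                  (PySem.Set.add v [x + dx, y + dy]) (p ++ [[x, y]])).1 with
              | some val => simp [hS]
              | none =>
                simp only [hS, Option.isSome_none, Bool.false_eq_true, if_false]
                have hmono := pvFreeI_mono (rows := (maze.length : Int))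
                  (cols := ((maze.headD []).length : Int)) hsub
                exact ihd _ x y p rest (hsub [x, y] hv) (le_trans hmono hb)
        · rw [if_neg (not_not_intro hbnd), dif_pos (Or.inl hget),
            dif_neg (fun hcon => hget hcon.2.2.2.2.1)]
          exact ihd v x y p rest hv hb
      · rw [if_pos hbnd, dif_neg (fun hcon => hbnd ⟨hcon.1, hcon.2.1, hcon.2.2.1, hcon.2.2.2.1⟩)]
        exact ihd v x y p rest hv hb

-- ===== VERDICT (by name: the statement is the Claim_ definition above) =====
theorem dfs_spec : Claim_equal_dfs := by
  unfold Claim_equal_dfs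
  intro maze start end_ visited path _ hpre
  unfold Spec_dfs
  obtain ⟨hlen, -⟩ := hpre
  match start, hlen with
  | [a, b], _ =>
    simp only [dfs, dfs_alt, List.headD_cons, List.drop_one, List.tail_cons]
    by_cases hse : ([a, b] : List Int) = end_
    · rw [dfsRecF, if_pos hse, if_pos hse]
    · rw [dfsRecF, if_neg hse, if_neg hse, pvStack_eq]
      have hmono := pvFreeI_mono (rows := (maze.length : Int))
        (cols := ((maze.headD []).length : Int))
        (v := visited.getD []) (w := PySem.Set.add (visited.getD []) [a, b])
        (fun c hc => (PySem.Set.mem_add _ _ _).2 (Or.inl hc))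
      rw [pvGoSim maze end_
        (pvFreeI (maze.length : Int) ((maze.headD []).length : Int) (visited.getD []) + 1) pvDirsA (PySem.Set.add (visited.getD []) [a, b]) a b
        (path.getD []) [] ((PySem.Set.mem_add _ _ _).2 (Or.inr rfl)) (by omega)]
      simp only [List.headD_eq_head?]
      cases hS : (dfsGoF (pvFreeI (maze.length : Int) (((maze.head?.getD []).length : Int)) (visited.getD []) + 1)
          maze a b end_ pvDirsA (PySem.Set.add (visited.getD []) [a, b]) (path.getD [])).1 with
      | some val => simp
      | none => simp [dfsLoop]
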